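-- pv_equiv track=rewrite | github.com/murilomonte/atv-tds | 1P/PEC/24-09-S3/01 - Sem 16 - tarefa 1 - runcodes/runcodes/r-t1-q1.py | maiorMenorPos
-- ===== SOURCE A (Python) =====
-- def maiorMenorPos(matriz):
--     maior = menor = matriz[0][0]
--     maiorPos = [0, 0]
--     menorPos = [0, 0]
--
--     for colInd, linha in enumerate(matriz):
--         for listInd, elemento in enumerate(linha):
--             if elemento > maior:
--                 maior = elemento
--                 maiorPos.clear()
--                 maiorPos.extend([colInd, listInd])
--
--             if elemento < menor:
--                 menor = elemento
--                 menorPos.clear()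
--                 menorPos.extend([colInd, listInd])
--
--     return tuple(maiorPos), tuple(menorPos)
-- ===== SOURCE B (Python) =====
-- def maiorMenorPos(matriz):
--     # Two-pass decomposition: compute the extreme values first, then locate
--     # the first position of each in a single row-major scan.
--     flat = [e for linha in matriz for e in linha]
--     maior = max(flat)
--     menor = min(flat)
--     maiorPos = None
--     menorPos = None
--     for i, linha in enumerate(matriz):
--         for j, e in enumerate(linha):
--             if maiorPos is None and e == maior:
--                 maiorPos = (i, j)
--             if menorPos is None and e == menor:
--                 menorPos = (i, j)
--     return maiorPos, menorPos
-- ===== Notes on version B (the rewrite author's own statement) =====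
-- stated objective: alternative
-- what changed: A tracks running max/min with positions via strict-improvement updates in one nested loop; B first computes the max and min values over the flattened matrix, then a second row-major pass records the first position equal to each.
import Mathlib
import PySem

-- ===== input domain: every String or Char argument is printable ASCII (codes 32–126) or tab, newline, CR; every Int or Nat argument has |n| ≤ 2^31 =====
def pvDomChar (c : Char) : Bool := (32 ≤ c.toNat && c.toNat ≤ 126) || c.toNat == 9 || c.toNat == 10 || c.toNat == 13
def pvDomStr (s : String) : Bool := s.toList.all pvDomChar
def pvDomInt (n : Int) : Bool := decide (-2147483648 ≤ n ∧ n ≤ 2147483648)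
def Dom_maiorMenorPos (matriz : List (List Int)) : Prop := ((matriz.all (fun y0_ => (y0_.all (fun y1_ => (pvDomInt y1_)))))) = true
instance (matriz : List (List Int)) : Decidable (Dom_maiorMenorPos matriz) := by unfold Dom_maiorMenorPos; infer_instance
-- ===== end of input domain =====

-- B replaces A's single strict-improvement tracking loop by two passes: extreme VALUES over the
-- flattened matrix first, then the first position equal to each; same results on Pre_.

-- ===== PORT A =====
-- literal port of A; the two `if`s update the (maior,maiorPos) / (menor,menorPos) accumulators
def maiorMenorPos (matriz : List (List Int)) : (Int × Int) × (Int × Int) :=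
  match matriz with
  | (e0 :: _) :: _ =>
      let st := (PySem.List.enumerate matriz 0).foldl
        (fun st c =>
          (PySem.List.enumerate c.2 0).foldl
            (fun st l =>
              ((if l.2 > st.1.1 then (l.2, (c.1, l.1)) else st.1),
               (if l.2 < st.2.1 then (l.2, (c.1, l.1)) else st.2)))
            st)
        ((e0, ((0:Int),(0:Int))), (e0, ((0:Int),(0:Int))))
      (st.1.2, st.2.2)
  | _ => ((0,0),(0,0))  -- Python: IndexError on matriz[0][0] (outside Pre_)

-- ===== PORT B =====
def maiorMenorPos_alt (matriz : List (List Int)) : (Int × Int) × (Int × Int) :=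
  let flat := matriz.flatMap (fun linha => linha)
  match PySem.List.max? flat (fun x => x), PySem.List.min? flat (fun x => x) with
  | some maior, some menor =>
      let st := (PySem.List.enumerate matriz 0).foldl
        (fun st c =>
          (PySem.List.enumerate c.2 0).foldl
            (fun st l =>
              ((if st.1 = none ∧ l.2 = maior then some (c.1, l.1) else st.1),
               (if st.2 = none ∧ l.2 = menor then some (c.1, l.1) else st.2)))
            st)
        ((none : Option (Int × Int)), (none : Option (Int × Int)))
      (st.1.getD (0,0), st.2.getD (0,0))
  | _, _ => ((0,0),(0,0))  -- Python: max()/min() raise ValueError on an empty flat (outside Pre_)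

-- ===== PRECONDITION & SPEC =====
-- Pre_ excludes exactly the inputs where A raises IndexError: an empty matrix or an empty first row.
def Pre_maiorMenorPos (matriz : List (List Int)) : Prop := matriz ≠ [] ∧ matriz.head! ≠ []
instance (matriz : List (List Int)) : Decidable (Pre_maiorMenorPos matriz) := by unfold Pre_maiorMenorPos; infer_instance
def pvWitness_maiorMenorPos : List (List Int) := [[3, 1], [2, 5]]

def Spec_maiorMenorPos (matriz : List (List Int)) (out : (Int × Int) × (Int × Int)) : Prop := out = maiorMenorPos_alt matriz
instance (matriz : List (List Int)) (out : (Int × Int) × (Int × Int)) : Decidable (Spec_maiorMenorPos matriz out) := by unfold Spec_maiorMenorPos; infer_instance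

-- ===== CLAIM (what is proved, stated in full; the proofs are below) =====
def Claim_equal_maiorMenorPos : Prop := ∀ (matriz : List (List Int)), Dom_maiorMenorPos matriz → Pre_maiorMenorPos matriz → Spec_maiorMenorPos matriz (maiorMenorPos matriz)

-- ===== LEMMAS AND PROOFS =====

-- the matrix flattened together with the (row, column) position of each element, row-major
def pvFlatPos (matriz : List (List Int)) : List ((Int × Int) × Int) :=
  (PySem.List.enumerate matriz 0).flatMap
    (fun c => (PySem.List.enumerate c.2 0).map (fun l => ((c.1, l.1), l.2)))

-- A's max-accumulator step / B's first-match step, over the flattened positioned list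
def pvStepMax (s : Int × (Int × Int)) (x : (Int × Int) × Int) : Int × (Int × Int) :=
  if x.2 > s.1 then (x.2, x.1) else s
def pvStepMin (s : Int × (Int × Int)) (x : (Int × Int) × Int) : Int × (Int × Int) :=
  if x.2 < s.1 then (x.2, x.1) else s
def pvFindMax (o : Option (Int × Int)) (v : Int) (x : (Int × Int) × Int) : Option (Int × Int) :=
  if o = none ∧ x.2 = v then some x.1 else o
def pvGm (L : List ((Int × Int) × Int)) (M : Int) : Int := L.foldl (fun a x => max a x.2) M
def pvGn (L : List ((Int × Int) × Int)) (M : Int) : Int := L.foldl (fun a x => min a x.2) M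

theorem pv_nested_foldl {σ : Type} (matriz : List (List Int)) (f : σ → ((Int × Int) × Int) → σ) (init : σ) :
    (PySem.List.enumerate matriz 0).foldl
      (fun st c => (PySem.List.enumerate c.2 0).foldl (fun st l => f st ((c.1, l.1), l.2)) st) init
    = (pvFlatPos matriz).foldl f init := by
  rw [pvFlatPos, List.foldl_flatMap]
  simp only [List.foldl_map]

theorem pv_map_snd_flatPos (matriz : List (List Int)) :
    (pvFlatPos matriz).map (·.2) = matriz.flatMap (fun linha => linha) := by
  rw [pvFlatPos, List.map_flatMap]
  have h : ∀ s : Int, ∀ l : List (List Int),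
      (PySem.List.enumerate l s).flatMap
        (fun c => ((PySem.List.enumerate c.2 0).map (fun x => ((c.1, x.1), x.2))).map (·.2))
      = l.flatMap (fun linha => linha) := by
    intro s l
    induction l generalizing s with
    | nil => simp [PySem.List.enumerate_nil]
    | cons r t ih =>
        simp only [PySem.List.enumerate_cons, List.flatMap_cons, ih]
        congr 1
        rw [List.map_map]
        exact PySem.List.map_snd_enumerate r 0
  exact h 0 matriz

theorem pvGm_ge (L : List ((Int × Int) × Int)) (M : Int) : M ≤ pvGm L M := by
  rw [pvGm, ← List.foldl_map (f := fun x : (Int × Int) × Int => x.2) (g := max)]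
  exact (PySem.List.le_foldl_max _ M).1

theorem pvGn_le (L : List ((Int × Int) × Int)) (M : Int) : pvGn L M ≤ M := by
  rw [pvGn, ← List.foldl_map (f := fun x : (Int × Int) × Int => x.2) (g := min)]
  exact (PySem.List.foldl_min_le _ M).1

theorem pvGm_mem (L : List ((Int × Int) × Int)) (M : Int) (h : M < pvGm L M) :
    ∃ y ∈ L, y.2 = pvGm L M := by
  have hm : pvGm L M = M ∨ pvGm L M ∈ L.map (·.2) := by
    rw [pvGm, ← List.foldl_map (f := fun x : (Int × Int) × Int => x.2) (g := max)]
    exact PySem.List.foldl_max_mem _ M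
  rcases hm with hm | hm
  · omega
  · rcases List.mem_map.mp hm with ⟨y, hy, hv⟩
    exact ⟨y, hy, hv⟩

theorem pvGn_mem (L : List ((Int × Int) × Int)) (M : Int) (h : pvGn L M < M) :
    ∃ y ∈ L, y.2 = pvGn L M := by
  have hm : pvGn L M = M ∨ pvGn L M ∈ L.map (·.2) := by
    rw [pvGn, ← List.foldl_map (f := fun x : (Int × Int) × Int => x.2) (g := min)]
    exact PySem.List.foldl_min_mem _ M
  rcases hm with hm | hm
  · omega
  · rcases List.mem_map.mp hm with ⟨y, hy, hv⟩
    exact ⟨y, hy, hv⟩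

theorem pv_find_some (L : List ((Int × Int) × Int)) (v : Int) (h : ∃ y ∈ L, y.2 = v) :
    (L.find? (fun y => y.2 == v)).isSome := by
  rcases h with ⟨y, hy, hv⟩
  exact List.find?_isSome.mpr ⟨y, hy, by simpa using hv⟩

theorem pv_maxFold_snd (L : List ((Int × Int) × Int)) (M : Int) (p : Int × Int) :
    (L.foldl pvStepMax (M, p)).2 =
      if M < pvGm L M then (((L.find? (fun y => y.2 == pvGm L M)).map (·.1)).getD p) else p := by
  induction L generalizing M p with
  | nil => simp [pvGm]
  | cons x t ih =>
      have hg : pvGm (x :: t) M = pvGm t (max M x.2) := by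
        simp [pvGm]
      by_cases hx : x.2 > M
      · have hmx : max M x.2 = x.2 := by omega
        simp only [List.foldl_cons, pvStepMax, if_pos hx]
        rw [ih x.2 x.1, hg, hmx]
        have hMg : M < pvGm t x.2 := lt_of_lt_of_le hx (pvGm_ge t x.2)
        rw [if_pos hMg]
        by_cases hxe : x.2 = pvGm t x.2
        · rw [if_neg (by omega : ¬ x.2 < pvGm t x.2)]
          rw [List.find?_cons_of_pos (by simpa using hxe)]
          simp
        · have hlt : x.2 < pvGm t x.2 := lt_of_le_of_ne (pvGm_ge t x.2) hxe
          rw [if_pos hlt]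
          rw [List.find?_cons_of_neg (by simpa using hxe)]
          rcases Option.isSome_iff_exists.mp (pv_find_some t _ (pvGm_mem t x.2 hlt)) with ⟨y, hy⟩
          rw [hy]; simp
      · have hmx : max M x.2 = M := by omega
        simp only [List.foldl_cons, pvStepMax, if_neg hx]
        rw [ih M p, hg, hmx]
        by_cases hMg : M < pvGm t M
        · rw [if_pos hMg, if_pos hMg]
          rw [show List.find? (fun y => y.2 == pvGm t M) (x :: t)
                = List.find? (fun y => y.2 == pvGm t M) t from
              List.find?_cons_of_neg (by simp only [beq_iff_eq]; omega)]
        · rw [if_neg hMg, if_neg hMg]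

theorem pv_minFold_snd (L : List ((Int × Int) × Int)) (M : Int) (p : Int × Int) :
    (L.foldl pvStepMin (M, p)).2 =
      if pvGn L M < M then (((L.find? (fun y => y.2 == pvGn L M)).map (·.1)).getD p) else p := by
  induction L generalizing M p with
  | nil => simp [pvGn]
  | cons x t ih =>
      have hg : pvGn (x :: t) M = pvGn t (min M x.2) := by
        simp [pvGn]
      by_cases hx : x.2 < M
      · have hmx : min M x.2 = x.2 := by omega
        simp only [List.foldl_cons, pvStepMin, if_pos hx]
        rw [ih x.2 x.1, hg, hmx]
        have hMg : pvGn t x.2 < M := lt_of_le_of_lt (pvGn_le t x.2) hx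
        rw [if_pos hMg]
        by_cases hxe : x.2 = pvGn t x.2
        · rw [if_neg (by omega : ¬ pvGn t x.2 < x.2)]
          rw [List.find?_cons_of_pos (by simpa using hxe)]
          simp
        · have hlt : pvGn t x.2 < x.2 := lt_of_le_of_ne (pvGn_le t x.2) (fun h => hxe h.symm)
          rw [if_pos hlt]
          rw [List.find?_cons_of_neg (by simpa using hxe)]
          rcases Option.isSome_iff_exists.mp (pv_find_some t _ (pvGn_mem t x.2 hlt)) with ⟨y, hy⟩
          rw [hy]; simp
      · have hmx : min M x.2 = M := by omega
        simp only [List.foldl_cons, pvStepMin, if_neg hx]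
        rw [ih M p, hg, hmx]
        by_cases hMg : pvGn t M < M
        · rw [if_pos hMg, if_pos hMg]
          rw [show List.find? (fun y => y.2 == pvGn t M) (x :: t)
                = List.find? (fun y => y.2 == pvGn t M) t from
              List.find?_cons_of_neg (by simp only [beq_iff_eq]; omega)]
        · rw [if_neg hMg, if_neg hMg]

theorem pv_findFold_some (L : List ((Int × Int) × Int)) (v : Int) (p : Int × Int) :
    L.foldl (fun o x => pvFindMax o v x) (some p) = some p := by
  induction L with
  | nil => rfl
  | cons x t ih =>
      have h1 : pvFindMax (some p) v x = some p := by simp [pvFindMax]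
      rw [List.foldl_cons, h1, ih]

theorem pv_findFold (L : List ((Int × Int) × Int)) (v : Int) :
    L.foldl (fun o x => pvFindMax o v x) none = (L.find? (fun y => y.2 == v)).map (·.1) := by
  induction L with
  | nil => rfl
  | cons x t ih =>
      rw [List.foldl_cons]
      by_cases hx : x.2 = v
      · rw [show pvFindMax none v x = some x.1 from by simp [pvFindMax, hx]]
        rw [pv_findFold_some, List.find?_cons_of_pos (by simpa using hx)]
        rfl
      · rw [show pvFindMax none v x = none from by simp [pvFindMax, hx]]
        rw [ih, List.find?_cons_of_neg (by simpa using hx)]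

theorem pv_flatPos_head (e0 : Int) (r : List Int) (rest : List (List Int)) :
    ∃ L', pvFlatPos ((e0 :: r) :: rest) = ((0, 0), e0) :: L' := by
  refine ⟨((PySem.List.enumerate r 1).map (fun l => (((0:Int), l.1), l.2))) ++
    (PySem.List.enumerate rest 1).flatMap
      (fun c => (PySem.List.enumerate c.2 0).map (fun l => ((c.1, l.1), l.2))), ?_⟩
  simp [pvFlatPos, PySem.List.enumerate_cons]

-- ===== VERDICT (by name: the statement is the Claim_ definition above) =====
theorem maiorMenorPos_spec : Claim_equal_maiorMenorPos := by
  intro matriz _ hpre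
  obtain ⟨hne, hhd⟩ := hpre
  obtain ⟨row0, rest, rfl⟩ : ∃ r t, matriz = r :: t := by
    cases matriz with
    | nil => exact absurd rfl hne
    | cons r t => exact ⟨r, t, rfl⟩
  obtain ⟨e0, r, rfl⟩ : ∃ e rr, row0 = e :: rr := by
    cases row0 with
    | nil => simp at hhd
    | cons e rr => exact ⟨e, rr, rfl⟩
  simp only [Spec_maiorMenorPos, maiorMenorPos, maiorMenorPos_alt]
  obtain ⟨L', hL⟩ := pv_flatPos_head e0 r rest
  -- flatten both nested folds, split the paired accumulators
  rw [show (fun (st : (Int × (Int × Int)) × (Int × (Int × Int))) (c : Int × List Int) =>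
        (PySem.List.enumerate c.2 0).foldl
          (fun st l =>
            ((if l.2 > st.1.1 then (l.2, (c.1, l.1)) else st.1),
             (if l.2 < st.2.1 then (l.2, (c.1, l.1)) else st.2))) st)
      = (fun st c => (PySem.List.enumerate c.2 0).foldl
          (fun st l => (pvStepMax st.1 ((c.1, l.1), l.2), pvStepMin st.2 ((c.1, l.1), l.2))) st)
      from rfl]
  rw [pv_nested_foldl ((e0 :: r) :: rest)
    (fun st x => (pvStepMax st.1 x, pvStepMin st.2 x)) ((e0, (0,0)), (e0, (0,0)))]
  rw [PySem.List.foldl_prod_mk (f := pvStepMax) (g := pvStepMin)]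
  -- value side of B
  have hflat : ((e0 :: r) :: rest).flatMap (fun linha => linha)
      = e0 :: (L'.map (·.2)) := by
    rw [← pv_map_snd_flatPos, hL]; rfl
  have hgm : pvGm (pvFlatPos ((e0 :: r) :: rest)) e0 = pvGm L' e0 := by
    rw [hL]; simp [pvGm]
  have hgn : pvGn (pvFlatPos ((e0 :: r) :: rest)) e0 = pvGn L' e0 := by
    rw [hL]; simp [pvGn]
  have hmax : PySem.List.max? (((e0 :: r) :: rest).flatMap (fun linha => linha)) (fun x => x)
      = some (pvGm (pvFlatPos ((e0 :: r) :: rest)) e0) := by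
    rw [hflat, PySem.List.max?_id_cons, hgm, pvGm,
      ← List.foldl_map (f := fun x : (Int × Int) × Int => x.2) (g := max)]
  have hmin : PySem.List.min? (((e0 :: r) :: rest).flatMap (fun linha => linha)) (fun x => x)
      = some (pvGn (pvFlatPos ((e0 :: r) :: rest)) e0) := by
    rw [hflat, PySem.List.min?_id_cons, hgn, pvGn,
      ← List.foldl_map (f := fun x : (Int × Int) × Int => x.2) (g := min)]
  simp only [hmax, hmin]
  set g := pvGm (pvFlatPos ((e0 :: r) :: rest)) e0 with hgdef
  set n := pvGn (pvFlatPos ((e0 :: r) :: rest)) e0 with hndef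
  rw [show (fun (st : Option (Int × Int) × Option (Int × Int)) (c : Int × List Int) =>
        (PySem.List.enumerate c.2 0).foldl
          (fun st l =>
            ((if st.1 = none ∧ l.2 = g then some (c.1, l.1) else st.1),
             (if st.2 = none ∧ l.2 = n then some (c.1, l.1) else st.2))) st)
      = (fun st c => (PySem.List.enumerate c.2 0).foldl
          (fun st l => (pvFindMax st.1 g ((c.1, l.1), l.2), pvFindMax st.2 n ((c.1, l.1), l.2))) st)
      from rfl]
  rw [pv_nested_foldl ((e0 :: r) :: rest)
    (fun st x => (pvFindMax st.1 g x, pvFindMax st.2 n x)) (none, none)]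
  rw [PySem.List.foldl_prod_mk (f := fun o x => pvFindMax o g x) (g := fun o x => pvFindMax o n x)]
  rw [pv_findFold, pv_findFold]
  -- A side: characterize the two accumulator folds
  rw [pv_maxFold_snd, pv_minFold_snd]
  rw [← hgdef, ← hndef]
  refine Prod.ext ?_ ?_ <;> dsimp only
  · by_cases hMg : e0 < g
    · rw [if_pos hMg]
    · rw [if_neg hMg]
      have hge : e0 = g := le_antisymm (hgdef ▸ pvGm_ge _ e0) (by omega)
      rw [hL, List.find?_cons_of_pos (by simp [← hge])]
      rfl
  · by_cases hMg : n < e0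
    · rw [if_pos hMg]
    · rw [if_neg hMg]
      have hge : e0 = n := le_antisymm (by omega) (hndef ▸ pvGn_le _ e0)
      rw [hL, List.find?_cons_of_pos (by simp [← hge])]
      rfl
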